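-- pv_equiv track=rewrite | github.com/lcm67088-tech/messenger-allInOne2 | 메신저올인원/각종 프로그램/카카오톡_올인원_v2.6.py | calculate_coordinates
-- ===== SOURCE A (Python) =====
-- def calculate_coordinates(start_x, start_y, cell_height,
--                            column_count, row_count, column_gap,
--                            scan_dir="col"):
--     """
--     그리드 좌표 자동 계산
--     scan_dir="col" : 열 우선 (↓→) — col0의 row0~N → col1의 row0~N → ...
--     scan_dir="row" : 행 우선 (→↓) — row0의 col0~N → row1의 col0~N → ...
--     x = start_x + col * column_gap
--     y = start_y + row * cell_height
--     """
--     coords = []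
--     if scan_dir == "col":
--         for col in range(column_count):
--             for row in range(row_count):
--                 x = start_x + col * column_gap
--                 y = start_y + row * cell_height
--                 coords.append((round(x), round(y)))
--     else:
--         for row in range(row_count):
--             for col in range(column_count):
--                 x = start_x + col * column_gap
--                 y = start_y + row * cell_height
--                 coords.append((round(x), round(y)))
--     return coords
-- ===== SOURCE B (Python) =====
-- def calculate_coordinates(start_x, start_y, cell_height,
--                            column_count, row_count, column_gap,
--                            scan_dir="col"):
--     # Single flat pass over k in range(rows*cols); the (col,row) pair is
--     # recovered from k by divmod instead of by nested loops.
--     if column_count <= 0 or row_count <= 0: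
--         return []
--     total = column_count * row_count
--     if scan_dir == "col":
--         return [(round(start_x + (k // row_count) * column_gap),
--                  round(start_y + (k % row_count) * cell_height))
--                 for k in range(total)]
--     return [(round(start_x + (k % column_count) * column_gap),
--              round(start_y + (k // column_count) * cell_height))
--             for k in range(total)]
-- ===== Notes on version B (the rewrite author's own statement) =====
-- stated objective: alternative
-- what changed: B replaces A's nested loops with a single flat loop over k in range(rows*cols), recovering the column and row of each cell from k by integer divmod arithmetic.
import Mathlib
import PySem

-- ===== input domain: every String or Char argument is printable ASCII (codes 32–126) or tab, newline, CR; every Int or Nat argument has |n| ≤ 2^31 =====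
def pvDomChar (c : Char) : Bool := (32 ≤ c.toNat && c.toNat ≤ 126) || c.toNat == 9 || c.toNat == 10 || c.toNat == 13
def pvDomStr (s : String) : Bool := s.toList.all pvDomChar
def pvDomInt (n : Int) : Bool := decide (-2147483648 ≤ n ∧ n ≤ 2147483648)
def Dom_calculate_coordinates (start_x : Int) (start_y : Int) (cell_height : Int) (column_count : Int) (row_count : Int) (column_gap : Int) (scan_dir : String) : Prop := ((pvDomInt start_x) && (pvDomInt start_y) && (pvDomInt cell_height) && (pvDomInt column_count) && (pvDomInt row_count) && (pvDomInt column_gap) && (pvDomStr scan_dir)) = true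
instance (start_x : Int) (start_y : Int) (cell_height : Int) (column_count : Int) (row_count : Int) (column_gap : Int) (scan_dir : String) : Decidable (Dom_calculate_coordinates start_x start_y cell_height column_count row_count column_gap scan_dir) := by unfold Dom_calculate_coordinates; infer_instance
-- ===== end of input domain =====

-- B flattens A's nested loops into one pass over k in range(rows*cols), recovering each cell's
-- (col,row) from k by divmod arithmetic (objective: alternative).

-- ===== PORT A =====
-- literal nested loops, coords threaded as an accumulator; round on an int is the identity
def calculate_coordinates (start_x : Int) (start_y : Int) (cell_height : Int) (column_count : Int) (row_count : Int) (column_gap : Int) (scan_dir : String) : List (Int × Int) :=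
  if scan_dir == "col" then
    (PySem.List.pyRange 0 column_count 1).foldl (fun coords col =>
      (PySem.List.pyRange 0 row_count 1).foldl (fun coords row =>
        coords ++ [(start_x + col * column_gap, start_y + row * cell_height)]) coords) []
  else
    (PySem.List.pyRange 0 row_count 1).foldl (fun coords row =>
      (PySem.List.pyRange 0 column_count 1).foldl (fun coords col =>
        coords ++ [(start_x + col * column_gap, start_y + row * cell_height)]) coords) []

-- ===== PORT B =====
def calculate_coordinates_alt (start_x : Int) (start_y : Int) (cell_height : Int) (column_count : Int) (row_count : Int) (column_gap : Int) (scan_dir : String) : List (Int × Int) :=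
  if column_count ≤ 0 ∨ row_count ≤ 0 then []
  else
    let total := column_count * row_count
    if scan_dir == "col" then
      (PySem.List.pyRange 0 total 1).map (fun k =>
        (start_x + PySem.Int.floordiv k row_count * column_gap,
         start_y + PySem.Int.mod k row_count * cell_height))
    else
      (PySem.List.pyRange 0 total 1).map (fun k =>
        (start_x + PySem.Int.mod k column_count * column_gap,
         start_y + PySem.Int.floordiv k column_count * cell_height))

-- ===== PRECONDITION & SPEC =====
def Spec_calculate_coordinates (start_x : Int) (start_y : Int) (cell_height : Int) (column_count : Int) (row_count : Int) (column_gap : Int) (scan_dir : String) (out : List (Int × Int)) : Prop := out = calculate_coordinates_alt start_x start_y cell_height column_count row_count column_gap scan_dir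
instance (start_x : Int) (start_y : Int) (cell_height : Int) (column_count : Int) (row_count : Int) (column_gap : Int) (scan_dir : String) (out : List (Int × Int)) : Decidable (Spec_calculate_coordinates start_x start_y cell_height column_count row_count column_gap scan_dir out) := by unfold Spec_calculate_coordinates; infer_instance

-- ===== CLAIM (what is proved, stated in full; the proofs are below) =====
def Claim_equal_calculate_coordinates : Prop := ∀ (start_x : Int) (start_y : Int) (cell_height : Int) (column_count : Int) (row_count : Int) (column_gap : Int) (scan_dir : String), Dom_calculate_coordinates start_x start_y cell_height column_count row_count column_gap scan_dir → Spec_calculate_coordinates start_x start_y cell_height column_count row_count column_gap scan_dir (calculate_coordinates start_x start_y cell_height column_count row_count column_gap scan_dir)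

-- ===== LEMMAS AND PROOFS =====

-- the nested append loop equals flatMap of the inner map
theorem foldl_nested_append_eq_flatMap {α β γ : Type} (outer : List α) (inner : List β)
    (f : α → β → γ) (acc : List γ) :
    outer.foldl (fun coords o => inner.foldl (fun coords i => coords ++ [f o i]) coords) acc
      = acc ++ outer.flatMap (fun o => inner.map (fun i => f o i)) := by
  induction outer generalizing acc with
  | nil => simp
  | cons h t ih =>
      simp only [List.foldl_cons, List.flatMap_cons]
      rw [PySem.List.foldl_append_singleton_eq_map, ih]
      simp

-- the two-level product list equals the divmod-indexed flat list
theorem flatMap_eq_map_divmod {γ : Type} (f : Int → Int → γ) (b : Int) (hb : 0 < b) :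
    ∀ a : Int, 0 ≤ a →
    (PySem.List.pyRange 0 a 1).flatMap (fun i => (PySem.List.pyRange 0 b 1).map (fun j => f i j))
      = (PySem.List.pyRange 0 (a * b) 1).map
          (fun k => f (PySem.Int.floordiv k b) (PySem.Int.mod k b)) := by
  refine Int.le_induction (m := 0) ?_ ?_
  · simp [PySem.List.pyRange_zero]
  · intro n hn ih
    rw [PySem.List.pyRange_one_succ_right (by omega), List.flatMap_append, ih,
        show (n + 1) * b = n * b + b by ring,
        PySem.List.pyRange_one_append 0 (n * b) (n * b + b)
          (by positivity) (by omega),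
        List.map_append]
    congr 1
    rw [PySem.List.pyRange_one, PySem.List.pyRange_one, List.flatMap_singleton,
        List.map_map, List.map_map]
    rw [show n * b + b - n * b = b - 0 by ring]
    refine List.map_congr_left ?_
    intro k hk
    have hk' : (k : Int) < b := by
      have := List.mem_range.mp hk
      have : ((n * b + b) - n * b).toNat = b.toNat := by omega
      omega
    have hk0 : (0 : Int) ≤ (k : Int) := Int.natCast_nonneg k
    simp only [Function.comp]
    have hdiv : PySem.Int.floordiv (n * b + k) b = n := by
      rw [PySem.Int.floordiv_eq_ediv_of_pos hb]
      rw [show n * b + (k : Int) = k + n * b by ring,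
          Int.add_mul_ediv_right _ _ (by omega : b ≠ 0),
          Int.ediv_eq_zero_of_lt hk0 hk']
      ring
    have hmod : PySem.Int.mod (n * b + k) b = k := by
      rw [PySem.Int.mod_eq_emod_of_pos hb]
      rw [show n * b + (k : Int) = k + b * n by ring, Int.add_mul_emod_self_left,
          Int.emod_eq_of_lt hk0 hk']
    simp only [hdiv, hmod, Int.zero_add]

-- ===== VERDICT (by name: the statement is the Claim_ definition above) =====
theorem calculate_coordinates_spec : Claim_equal_calculate_coordinates := by
  intro sx sy ch cc rc cg sd _
  unfold Spec_calculate_coordinates calculate_coordinates calculate_coordinates_alt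
  by_cases hz : cc ≤ 0 ∨ rc ≤ 0
  · rcases hz with hz | hz <;>
      simp [PySem.List.pyRange_one_eq_nil hz, hz]
  · push Not at hz
    obtain ⟨hc, hr⟩ := hz
    simp only [if_neg (by omega : ¬ (cc ≤ 0 ∨ rc ≤ 0))]
    by_cases h : sd == "col"
    · simp only [h, if_true]
      rw [foldl_nested_append_eq_flatMap, List.nil_append,
          flatMap_eq_map_divmod _ rc hr cc (by omega)]
    · simp only [h, if_false, Bool.false_eq_true]
      rw [foldl_nested_append_eq_flatMap, List.nil_append,
          flatMap_eq_map_divmod _ cc hc rc (by omega)]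
      rw [show rc * cc = cc * rc by ring]
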